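-- pv_equiv track=rewrite | github.com/Garmelon/advent-of-code | py/aoc/y2018/d03.py | count_claims
-- ===== SOURCE A (Python) =====
-- def count_claims(claims):
--     squares = {}
--     for x, y, w, h in claims.values():
--         for dw in range(w):
--             for dh in range(h):
--                 coords = (x + dw, y + dh)
--                 squares[coords] = squares.get(coords, 0) + 1
--     return squares
-- ===== SOURCE B (Python) =====
-- def count_claims(claims):
--     rects = list(claims.values())
--     covered = dict.fromkeys((x + dw, y + dh)
--                             for x, y, w, h in rects
--                             for dw in range(w)
--                             for dh in range(h))
--     return {(px, py): sum(1 for x, y, w, h in rects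
--                           if x <= px < x + w and y <= py < y + h)
--             for (px, py) in covered}
-- ===== Notes on version B (the rewrite author's own statement) =====
-- stated objective: alternative
-- what changed: A increments a counter dict for every generated cell of every rectangle; B first collects the distinct covered cells (ordered dedup of one flat generator) and then computes each cell's count by a geometric test, counting the rectangles that contain it.
import Mathlib
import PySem

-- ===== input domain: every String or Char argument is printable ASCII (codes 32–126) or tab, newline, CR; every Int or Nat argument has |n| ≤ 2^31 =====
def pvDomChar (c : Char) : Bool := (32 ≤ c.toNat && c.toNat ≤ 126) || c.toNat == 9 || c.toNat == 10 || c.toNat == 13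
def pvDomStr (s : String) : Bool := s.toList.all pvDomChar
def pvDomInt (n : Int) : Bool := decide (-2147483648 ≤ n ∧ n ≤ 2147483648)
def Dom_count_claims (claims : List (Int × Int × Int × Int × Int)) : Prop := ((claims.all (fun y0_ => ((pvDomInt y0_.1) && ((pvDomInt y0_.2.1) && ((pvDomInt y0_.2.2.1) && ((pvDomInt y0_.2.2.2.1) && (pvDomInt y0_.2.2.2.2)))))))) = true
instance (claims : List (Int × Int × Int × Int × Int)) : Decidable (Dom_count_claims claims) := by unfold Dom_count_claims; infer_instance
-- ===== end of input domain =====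

-- B replaces A's per-cell counter updates by an ordered dedup of the covered cells followed by a
-- geometric rectangle-containment count per distinct cell (objective: alternative algorithm, same cost class).


-- ===== PORT A =====
-- literal port of A: claims is a dict (id → (x, y, w, h)); iterate over its values, and for each
-- rectangle increment squares[(x+dw, y+dh)] for every dw < w, dh < h; return the squares dict,
-- whose ((px, py), n) items are flattened to (px, py, n) triples by the type convention.
def count_claims (claims : List (Int × Int × Int × Int × Int)) : List (Int × Int × Int) :=
  let squares : PySem.Dict (Int × Int) Int :=
    ((PySem.Dict.ofList claims).values).foldl
      (fun sq r =>
        (PySem.List.pyRange 0 r.2.2.1 1).foldl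
          (fun sq dw =>
            (PySem.List.pyRange 0 r.2.2.2 1).foldl
              (fun sq dh =>
                sq.insert (r.1 + dw, r.2.1 + dh) (sq.getD (r.1 + dw, r.2.1 + dh) 0 + 1))
              sq)
          sq)
      PySem.Dict.empty
  squares.items.map (fun p => (p.1.1, p.1.2, p.2))

-- ===== PORT B =====
-- literal port of B: covered = dict.fromkeys(flat generator of all cells) (= PySem.List.dedup),
-- then for each distinct cell count the rectangles that contain it.
def count_claims_alt (claims : List (Int × Int × Int × Int × Int)) : List (Int × Int × Int) :=
  let rects := (PySem.Dict.ofList claims).values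
  let covered := PySem.List.dedup
    (rects.flatMap (fun r =>
      (PySem.List.pyRange 0 r.2.2.1 1).flatMap (fun dw =>
        (PySem.List.pyRange 0 r.2.2.2 1).map (fun dh => (r.1 + dw, r.2.1 + dh)))))
  covered.map (fun c =>
    (c.1, c.2,
      ((rects.countP (fun r =>
        decide (r.1 ≤ c.1 ∧ c.1 < r.1 + r.2.2.1 ∧ r.2.1 ≤ c.2 ∧ c.2 < r.2.1 + r.2.2.2)) : Nat) : Int)))

-- ===== PRECONDITION & SPEC =====
def Spec_count_claims (claims : List (Int × Int × Int × Int × Int)) (out : List (Int × Int × Int)) : Prop := out = count_claims_alt claims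
instance (claims : List (Int × Int × Int × Int × Int)) (out : List (Int × Int × Int)) : Decidable (Spec_count_claims claims out) := by unfold Spec_count_claims; infer_instance

-- ===== CLAIM (what is proved, stated in full; the proofs are below) =====
def Claim_equal_count_claims : Prop := ∀ (claims : List (Int × Int × Int × Int × Int)), Dom_count_claims claims → Spec_count_claims claims (count_claims claims)

-- ===== LEMMAS AND PROOFS =====

-- the cells of one rectangle, in A's generation order (dw outer, dh inner)
def pvRectCells (r : Int × Int × Int × Int) : List (Int × Int) :=
  (PySem.List.pyRange 0 r.2.2.1 1).flatMap (fun dw =>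
    (PySem.List.pyRange 0 r.2.2.2 1).map (fun dh => (r.1 + dw, r.2.1 + dh)))

def pvContains (r : Int × Int × Int × Int) (c : Int × Int) : Bool :=
  decide (r.1 ≤ c.1 ∧ c.1 < r.1 + r.2.2.1 ∧ r.2.1 ≤ c.2 ∧ c.2 < r.2.1 + r.2.2.2)

-- a rectangle's cell list is duplicate-free
theorem pv_nodup_rectCells (r : Int × Int × Int × Int) : (pvRectCells r).Nodup := by
  rw [pvRectCells, List.nodup_flatMap]
  constructor
  · intro dw _
    refine (PySem.List.nodup_pyRange_one _ _).map ?_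
    intro a b h
    have := congrArg Prod.snd h
    simp only at this
    omega
  · refine (PySem.List.pairwise_lt_pyRange_one _ _).imp ?_
    intro a b hab c hc1 hc2
    simp only [List.mem_map] at hc1 hc2
    obtain ⟨dh1, _, rfl⟩ := hc1
    obtain ⟨dh2, _, h2⟩ := hc2
    have := congrArg Prod.fst h2
    simp only at this
    omega

-- membership in a rectangle's cell list is containment
theorem pv_mem_rectCells (r : Int × Int × Int × Int) (c : Int × Int) :
    c ∈ pvRectCells r ↔ pvContains r c = true := by
  obtain ⟨cx, cy⟩ := c
  simp only [pvRectCells, pvContains, List.mem_flatMap, List.mem_map,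
    PySem.List.mem_pyRange_one, decide_eq_true_eq, Prod.mk.injEq]
  constructor
  · rintro ⟨dw, ⟨h1, h2⟩, dh, ⟨h3, h4⟩, rfl, rfl⟩
    omega
  · rintro ⟨h1, h2, h3, h4⟩
    exact ⟨cx - r.1, by omega, cy - r.2.1, by omega, by omega, by omega⟩

-- each rectangle contributes its containment indicator to a cell's count
theorem pv_count_rectCells (r : Int × Int × Int × Int) (c : Int × Int) :
    (pvRectCells r).count c = if pvContains r c then 1 else 0 := by
  by_cases h : pvContains r c = true
  · simp [h, List.count_eq_one_of_mem (pv_nodup_rectCells r) ((pv_mem_rectCells r c).mpr h)]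
  · simp [h, List.count_eq_zero.mpr (fun hm => h ((pv_mem_rectCells r c).mp hm))]

-- a cell's multiplicity in the flattened cell list = number of rectangles containing it
theorem pv_count_cells (rects : List (Int × Int × Int × Int)) (c : Int × Int) :
    (rects.flatMap pvRectCells).count c = rects.countP (fun r => pvContains r c) := by
  induction rects with
  | nil => simp
  | cons r t ih =>
    simp only [List.flatMap_cons, List.count_append, List.countP_cons, ih, pv_count_rectCells]
    by_cases h : pvContains r c = true
    · simp only [h, if_true]
      omega
    · simp [h]

-- A's nested loops build exactly the counter of the flattened cell list
theorem pv_nest_eq_counter (rects : List (Int × Int × Int × Int)) :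
    rects.foldl
      (fun sq r =>
        (PySem.List.pyRange 0 r.2.2.1 1).foldl
          (fun sq dw =>
            (PySem.List.pyRange 0 r.2.2.2 1).foldl
              (fun sq dh =>
                sq.insert (r.1 + dw, r.2.1 + dh) (sq.getD (r.1 + dw, r.2.1 + dh) 0 + 1))
              sq)
          sq)
      PySem.Dict.empty
    = PySem.Dict.counter (rects.flatMap pvRectCells) := by
  rw [← PySem.Dict.foldl_insert_getD_add_one_eq_counter]
  generalize (PySem.Dict.empty : PySem.Dict (Int × Int) Int) = d
  induction rects generalizing d with
  | nil => rfl
  | cons r t ih =>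
    simp only [List.flatMap_cons, List.foldl_append, List.foldl_cons, ih]
    congr 1
    rw [pvRectCells, List.foldl_flatMap]
    simp only [List.foldl_map]

-- ===== VERDICT (by name: the statement is the Claim_ definition above) =====
theorem count_claims_spec : Claim_equal_count_claims := by
  intro claims _
  unfold Spec_count_claims count_claims count_claims_alt
  simp only [pv_nest_eq_counter, PySem.Dict.items_counter, PySem.List.dedup_eq_ofList]
  rw [List.map_map]
  refine List.map_congr_left ?_
  intro c _
  simp only [Function.comp]
  have h := pv_count_cells (PySem.Dict.ofList claims).values c
  simp only [pvContains] at h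
  rw [h]
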